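-- pv_equiv track=rewrite | github.com/tmdgh1592/PROBLEM_SOLVE | 둘만의 암호.py | solution
-- ===== SOURCE A (Python) =====
-- def solution(s, skip, index):
--     skip = set(skip)
--     answer = ''
--
--     for ch in s:
--         i = 1
--         next_ch = ''
--         cur_index = index
--         while i <= cur_index:
--             next_ch = chr(((ord(ch) - 97) + i) % 26 + 97)
--             i += 1
--             if next_ch in skip:
--                 cur_index += 1
--         answer += next_ch
--
--     return answer
-- ===== SOURCE B (Python) =====
-- def solution(s, skip, index):
--     # Rank/closed-form reimplementation: the answer for a character is the
--     # index-th allowed letter after it (cyclically). Precompute the allowed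
--     # positions once; per character take rank + index - 1 modulo the count.
--     if index < 1:
--         return ''
--     skipset = set(skip)
--     allowed = [p for p in range(26) if chr(p + 97) not in skipset]
--     out = []
--     for ch in s:
--         base = (ord(ch) - 97) % 26
--         j = sum(1 for p in allowed if p <= base)
--         out.append(chr(allowed[(j + index - 1) % len(allowed)] + 97))
--     return ''.join(out)
-- ===== Notes on version B (the rewrite author's own statement) =====
-- stated objective: faster
-- what changed: A steps letter by letter, inflating the loop bound for every skipped letter, costing O(index) per character; B precomputes the list of allowed letter positions once and computes each output character in closed form as allowed[(rank(base) + index - 1) mod len(allowed)].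
import Mathlib
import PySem

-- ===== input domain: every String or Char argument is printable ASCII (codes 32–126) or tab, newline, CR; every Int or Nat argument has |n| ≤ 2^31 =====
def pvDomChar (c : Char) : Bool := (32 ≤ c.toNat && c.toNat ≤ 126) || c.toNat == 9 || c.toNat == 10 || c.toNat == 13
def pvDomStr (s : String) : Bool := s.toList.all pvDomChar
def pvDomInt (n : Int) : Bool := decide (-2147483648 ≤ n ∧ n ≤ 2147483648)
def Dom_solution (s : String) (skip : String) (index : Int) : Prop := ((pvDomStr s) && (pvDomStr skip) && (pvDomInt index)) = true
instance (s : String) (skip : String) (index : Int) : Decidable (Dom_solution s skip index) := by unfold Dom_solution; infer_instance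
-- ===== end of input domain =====

-- B replaces A's per-character O(index) stepping loop by a precomputed list of allowed
-- letter positions and a rank + (index-1) mod count closed form per character (objective: faster).
-- Strings are handled as their character lists (PySem style); 'answer += next_ch' is list append.

-- ===== PORT A =====
-- 'while i <= cur_index' ported with a fuel counter that provably suffices whenever the
-- Python loop terminates (fuel = 0 is only reached on inputs excluded by Pre_solution).
def pvLoopA (skipset : PySem.Set Char) (b : Int) : Nat → Int → Int → List Char → List Char
  | 0, _, _, next => next
  | fuel+1, i, cur, next =>
    if i ≤ cur then
      let nc := Char.ofNat ((PySem.Int.mod (b + i) 26 + 97).toNat)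
      if skipset.contains nc then pvLoopA skipset b fuel (i+1) (cur+1) [nc]
      else pvLoopA skipset b fuel (i+1) cur [nc]
    else next

def solution (s : String) (skip : String) (index : Int) : String :=
  let skipset : PySem.Set Char := PySem.Set.ofList skip.toList
  String.ofList (s.toList.foldl (fun answer ch =>
    answer ++ pvLoopA skipset ((ch.toNat : Int) - 97) (26 * (index + 2)).toNat 1 index []) [])

-- ===== PORT B =====
def solution_alt (s : String) (skip : String) (index : Int) : String :=
  if index < 1 then "" else
  let skipset : PySem.Set Char := PySem.Set.ofList skip.toList
  let allowed : List Int := (PySem.List.pyRange 0 26 1).filter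
      (fun p => !(skipset.contains (Char.ofNat (p + 97).toNat)))
  String.ofList (s.toList.map (fun ch =>
    let base := PySem.Int.mod ((ch.toNat : Int) - 97) 26
    let j : Int := (allowed.countP (fun p => decide (p ≤ base)) : Nat)
    Char.ofNat (((PySem.List.pyGet? allowed
        (PySem.Int.mod (j + index - 1) (allowed.length : Int))).getD 0 + 97).toNat)))

-- ===== PRECONDITION & SPEC =====
-- Pre_ excludes exactly the inputs on which A's while-loop never terminates (s nonempty,
-- index ≥ 1 and every lowercase letter in skip): A returns no value there (it diverges).
def Pre_solution (s : String) (skip : String) (index : Int) : Prop :=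
  index < 1 ∨ s = "" ∨
  ((List.range 26).any (fun q => !(skip.toList.contains (Char.ofNat (q + 97))))) = true
instance (s : String) (skip : String) (index : Int) : Decidable (Pre_solution s skip index) := by
  unfold Pre_solution; infer_instance

def pvWitness_solution : String × String × Int := ("ab", "b", 2)

def Spec_solution (s : String) (skip : String) (index : Int) (out : String) : Prop := out = solution_alt s skip index
instance (s : String) (skip : String) (index : Int) (out : String) : Decidable (Spec_solution s skip index out) := by unfold Spec_solution; infer_instance

-- ===== CLAIM (what is proved, stated in full; the proofs are below) =====
def Claim_equal_solution : Prop := ∀ (s : String) (skip : String) (index : Int), Dom_solution s skip index → Pre_solution s skip index → Spec_solution s skip index (solution s skip index)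

-- ===== LEMMAS AND PROOFS =====

-- abbreviations: the allowed-letter predicate, positions, prefix counts, scan distance
def pvP (skip : String) (q : Nat) : Bool := !((PySem.Set.ofList skip.toList).contains (Char.ofNat (q + 97)))
def pvPos (skip : String) : List Nat := (List.range 26).filter (pvP skip)
def pvCnt (skip : String) (q : Nat) : Nat := ((List.range (q + 1)).filter (pvP skip)).length
def pvDistAux (skip : String) : Nat → Nat → Nat
  | 0, _ => 0
  | f+1, q => if pvP skip ((q + 1) % 26) then 1 else 1 + pvDistAux skip f ((q + 1) % 26)
def pvDist (skip : String) (q : Nat) : Nat := pvDistAux skip 26 q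

theorem pvDistAux_le (skip : String) : ∀ f q, pvDistAux skip f q ≤ f := by
  intro f
  induction f with
  | zero => intro q; simp [pvDistAux]
  | succ f ih =>
    intro q
    simp only [pvDistAux]
    split
    · omega
    · have := ih ((q + 1) % 26); omega

theorem pvDist_pos (skip : String) (q : Nat) : 1 ≤ pvDist skip q := by
  have h : pvDist skip q = if pvP skip ((q + 1) % 26) then 1 else 1 + pvDistAux skip 25 ((q + 1) % 26) := rfl
  rw [h]; split <;> omega

theorem pvDistAux_stable (skip : String) : ∀ t f1 f2 q, 1 ≤ t → t ≤ f1 → t ≤ f2 →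
    pvP skip ((q + t) % 26) = true → pvDistAux skip f1 q = pvDistAux skip f2 q := by
  intro t
  induction t with
  | zero => intro f1 f2 q h; omega
  | succ t ih =>
    intro f1 f2 q h1 hf1 hf2 hp
    obtain ⟨f1', rfl⟩ : ∃ k, f1 = k + 1 := ⟨f1 - 1, by omega⟩
    obtain ⟨f2', rfl⟩ : ∃ k, f2 = k + 1 := ⟨f2 - 1, by omega⟩
    simp only [pvDistAux]
    by_cases hq : pvP skip ((q + 1) % 26) = true
    · simp [hq]
    · simp only [hq, if_false, Bool.false_eq_true]
      have ht : 1 ≤ t := by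
        rcases Nat.eq_zero_or_pos t with h0 | h0
        · exfalso; apply hq; simpa [h0] using hp
        · exact h0
      have harg : ((q + 1) % 26 + t) % 26 = (q + (t + 1)) % 26 := by omega
      have := ih f1' f2' ((q + 1) % 26) ht (by omega) (by omega) (by rw [harg]; exact hp)
      omega

theorem pvDist_succ (skip : String) (q : Nat) (hex : ∃ a, a < 26 ∧ pvP skip a = true)
    (hn : ¬ pvP skip ((q + 1) % 26) = true) :
    pvDist skip q = 1 + pvDist skip ((q + 1) % 26) := by
  obtain ⟨a, ha26, haP⟩ := hex
  have hq' : (q + 1) % 26 < 26 := by omega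
  have hne : a ≠ (q + 1) % 26 := by intro h; rw [h] at haP; exact hn haP
  have h1 : pvDist skip q = 1 + pvDistAux skip 25 ((q + 1) % 26) := by
    have h : pvDist skip q = if pvP skip ((q + 1) % 26) then 1 else 1 + pvDistAux skip 25 ((q + 1) % 26) := rfl
    rw [h, if_neg hn]
  rw [h1]
  congr 1
  obtain ⟨t, ht1, ht25, hteq⟩ : ∃ t, 1 ≤ t ∧ t ≤ 25 ∧ ((q + 1) % 26 + t) % 26 = a := by
    by_cases hc : (q + 1) % 26 < a
    · exact ⟨a - (q + 1) % 26, by omega, by omega, by omega⟩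
    · exact ⟨a + 26 - (q + 1) % 26, by omega, by omega, by omega⟩
  exact pvDistAux_stable skip t 25 26 ((q + 1) % 26) ht1 (by omega) (by omega)
    (by rw [hteq]; exact haP)

theorem pvCnt_succ (skip : String) (q : Nat) :
    pvCnt skip (q + 1) = pvCnt skip q + (if pvP skip (q + 1) then 1 else 0) := by
  unfold pvCnt
  rw [List.range_succ (n := q + 1), List.filter_append, List.length_append]
  simp only [List.filter_cons, List.filter_nil]
  split <;> simp

theorem pvCnt_25 (skip : String) : pvCnt skip 25 = (pvPos skip).length := rfl

theorem pvCnt_le (skip : String) (q : Nat) (h : q ≤ 25) : pvCnt skip q ≤ (pvPos skip).length := by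
  have hsplit : (List.range 26) = List.range (q + 1) ++ List.map (fun x => (q + 1) + x) (List.range (25 - q)) := by
    rw [← List.range_add]; congr 1; omega
  unfold pvCnt pvPos
  rw [hsplit, List.filter_append, List.length_append]
  omega

theorem pvPos_getD_cnt (skip : String) (q : Nat) (hq : q < 26) (hP : pvP skip q = true) :
    (pvPos skip).getD (pvCnt skip q - 1) 0 = q ∧ 1 ≤ pvCnt skip q := by
  have hsplit26 : (List.range 26) = List.range (q + 1) ++ List.map (fun x => (q + 1) + x) (List.range (25 - q)) := by
    rw [← List.range_add]; congr 1; omega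
  have hcq : pvCnt skip q = ((List.range q).filter (pvP skip)).length + 1 := by
    unfold pvCnt
    rw [List.range_succ, List.filter_append]
    simp [hP]
  refine ⟨?_, by omega⟩
  have hpos : pvPos skip = ((List.range q).filter (pvP skip)) ++ q ::
      ((List.map (fun x => (q + 1) + x) (List.range (25 - q))).filter (pvP skip)) := by
    unfold pvPos
    rw [hsplit26, List.filter_append, List.range_succ, List.filter_append]
    simp [hP]
  rw [hpos, hcq]
  simp

theorem pvL_pos (skip : String) (hex : ∃ a, a < 26 ∧ pvP skip a = true) :
    0 < (pvPos skip).length := by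
  obtain ⟨a, ha, hP⟩ := hex
  have hmem : a ∈ pvPos skip := by
    simp [pvPos, List.mem_filter, List.mem_range, ha, hP]
  exact List.length_pos_of_mem hmem

theorem pvLoopA_done (skipset : PySem.Set Char) (b : Int) :
    ∀ f (i cur : Int) next, cur < i → pvLoopA skipset b f i cur next = next := by
  intro f i cur next h
  cases f with
  | zero => rfl
  | succ f => simp only [pvLoopA]; rw [if_neg (by omega)]

-- the heart: A's while-loop returns the r-th allowed letter after position q (cyclically),
-- which is pos[(cnt q + r - 1) mod L]
theorem pvLoopA_eq (skip : String) (hex : ∃ a, a < 26 ∧ pvP skip a = true) (b : Int) :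
    ∀ fuel (i cur : Int) (next : List Char) (q r : Nat),
      1 ≤ i → cur - i + 1 = (r : Int) → 1 ≤ r →
      (q : Int) = (b + i - 1) % 26 →
      26 * (r - 1) + pvDist skip q ≤ fuel →
      pvLoopA (PySem.Set.ofList skip.toList) b fuel i cur next
        = [Char.ofNat ((pvPos skip).getD ((pvCnt skip q + r - 1) % (pvPos skip).length) 0 + 97)] := by
  intro fuel
  induction fuel with
  | zero =>
    intro i cur next q r hi hric hr hq hf
    exfalso
    have := pvDist_pos skip q
    omega
  | succ fuel ih =>
    intro i cur next q r hi hric hr hq hf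
    have hq26 : q < 26 := by omega
    have hile : i ≤ cur := by omega
    have hdle : pvDist skip q ≤ 26 := pvDistAux_le skip 26 q
    have hdpos : 1 ≤ pvDist skip q := pvDist_pos skip q
    simp only [pvLoopA]
    rw [if_pos hile]
    have hnc : ((PySem.Int.mod (b + i) 26 + 97)).toNat = (q + 1) % 26 + 97 := by
      rw [PySem.Int.mod_eq_emod_of_pos (by norm_num)]
      omega
    simp only [hnc]
    have hq'26 : (q + 1) % 26 < 26 := by omega
    have hcont : (PySem.Set.ofList skip.toList).contains (Char.ofNat ((q + 1) % 26 + 97))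
        = !(pvP skip ((q + 1) % 26)) := by
      simp [pvP]
    rw [hcont]
    have hLpos : 0 < (pvPos skip).length := pvL_pos skip hex
    by_cases hPq' : pvP skip ((q + 1) % 26) = true
    · -- allowed letter: the 'not in skip' branch
      rw [hPq']
      simp only [Bool.not_true, Bool.false_eq_true, if_false]
      by_cases hr1 : r = 1
      · rw [pvLoopA_done _ _ fuel (i + 1) cur _ (by omega)]
        subst hr1
        have hgoal : (pvPos skip).getD ((pvCnt skip q + 1 - 1) % (pvPos skip).length) 0
            = (q + 1) % 26 := by
          by_cases hq25 : q = 25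
          · subst hq25
            have h0 : (25 + 1) % 26 = 0 := rfl
            rw [h0] at hPq' ⊢
            obtain ⟨hg, hc1⟩ := pvPos_getD_cnt skip 0 (by omega) hPq'
            have hcnt0 : pvCnt skip 0 ≤ 1 := by
              unfold pvCnt
              have h01 : List.range (0 + 1) = [0] := rfl
              rw [h01]
              cases h : pvP skip 0 <;> simp [List.filter, h]
            have hcnt0' : pvCnt skip 0 = 1 := by omega
            rw [hcnt0'] at hg
            rw [pvCnt_25]
            simpa [Nat.mod_self] using hg
          · have hq'' : (q + 1) % 26 = q + 1 := by omega
            rw [hq''] at hPq' ⊢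
            have hcs := pvCnt_succ skip q
            rw [hPq'] at hcs
            simp only [if_true] at hcs
            obtain ⟨hg, hc1⟩ := pvPos_getD_cnt skip (q + 1) (by omega) hPq'
            have hle := pvCnt_le skip (q + 1) (by omega)
            rw [show pvCnt skip q + 1 - 1 = pvCnt skip (q + 1) - 1 by omega,
              Nat.mod_eq_of_lt (by omega)]
            exact hg
        rw [hgoal]
      · -- r ≥ 2: one allowed step consumed, recurse
        rw [ih (i + 1) cur _ ((q + 1) % 26) (r - 1) (by omega) (by omega) (by omega)
          (by omega) (by have h2 : pvDist skip ((q + 1) % 26) ≤ 26 := pvDistAux_le skip 26 ((q + 1) % 26); omega)]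
        have hidx : (pvCnt skip ((q + 1) % 26) + (r - 1) - 1) % (pvPos skip).length
            = (pvCnt skip q + r - 1) % (pvPos skip).length := by
          by_cases hq25 : q = 25
          · subst hq25
            have h0 : (25 + 1) % 26 = 0 := rfl
            rw [h0] at hPq' ⊢
            have hc1 := (pvPos_getD_cnt skip 0 (by omega) hPq').2
            have hcnt0 : pvCnt skip 0 ≤ 1 := by
              unfold pvCnt
              have h01 : List.range (0 + 1) = [0] := rfl
              rw [h01]
              cases h : pvP skip 0 <;> simp [List.filter, h]
            have hcnt0' : pvCnt skip 0 = 1 := by omega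
            rw [hcnt0', pvCnt_25]
            rw [show (pvPos skip).length + r - 1 = (pvPos skip).length + (r - 1) by omega,
              Nat.add_mod_left]
            congr 1
            omega
          · have hq'' : (q + 1) % 26 = q + 1 := by omega
            rw [hq''] at hPq' ⊢
            have hcs := pvCnt_succ skip q
            rw [hPq'] at hcs
            simp only [if_true] at hcs
            congr 1
            omega
        rw [hidx]
    · -- skipped letter: the 'in skip' branch
      rw [eq_false_of_ne_true hPq']
      simp only [Bool.not_false, if_true]
      have hds := pvDist_succ skip q hex hPq'
      rw [ih (i + 1) (cur + 1) _ ((q + 1) % 26) r (by omega) (by omega) hr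
        (by omega) (by omega)]
      have hidx : (pvCnt skip ((q + 1) % 26) + r - 1) % (pvPos skip).length
          = (pvCnt skip q + r - 1) % (pvPos skip).length := by
        by_cases hq25 : q = 25
        · subst hq25
          have h0 : (25 + 1) % 26 = 0 := rfl
          rw [h0] at hPq' ⊢
          have hcnt0 : pvCnt skip 0 = 0 := by
            unfold pvCnt
            have h01 : List.range (0 + 1) = [0] := rfl
            rw [h01]
            simp [List.filter, eq_false_of_ne_true hPq']
          rw [hcnt0, pvCnt_25]
          rw [show (pvPos skip).length + r - 1 = (pvPos skip).length + (r - 1) by omega,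
            Nat.add_mod_left]
          congr 1
          omega
        · have hq'' : (q + 1) % 26 = q + 1 := by omega
          rw [hq''] at hPq' ⊢
          have hcs := pvCnt_succ skip q
          rw [eq_false_of_ne_true hPq'] at hcs
          simp only [Bool.false_eq_true, if_false] at hcs
          rw [hcs, Nat.add_zero]
      rw [hidx]

-- B's per-character value equals the same closed form
theorem pvAlt_char_eq (skip : String) (hex : ∃ a, a < 26 ∧ pvP skip a = true)
    (index : Int) (hidx : 1 ≤ index) (ch : Char) :
    (let skipset : PySem.Set Char := PySem.Set.ofList skip.toList
     let allowed : List Int := (PySem.List.pyRange 0 26 1).filter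
        (fun p => !(skipset.contains (Char.ofNat (p + 97).toNat)))
     let base := PySem.Int.mod ((ch.toNat : Int) - 97) 26
     let j : Int := (allowed.countP (fun p => decide (p ≤ base)) : Nat)
     Char.ofNat (((PySem.List.pyGet? allowed
        (PySem.Int.mod (j + index - 1) (allowed.length : Int))).getD 0 + 97).toNat))
      = Char.ofNat ((pvPos skip).getD ((pvCnt skip (((ch.toNat : Int) - 97) % 26).toNat
          + index.toNat - 1) % (pvPos skip).length) 0 + 97) := by
  have hLpos : 0 < (pvPos skip).length := pvL_pos skip hex
  set bn := (((ch.toNat : Int) - 97) % 26).toNat with hbndef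
  have hbn26 : bn < 26 := by omega
  have hbase : PySem.Int.mod ((ch.toNat : Int) - 97) 26 = (bn : Int) := by
    rw [PySem.Int.mod_eq_emod_of_pos (by norm_num)]
    omega
  have hallowed : (PySem.List.pyRange 0 26 1).filter
      (fun p => !((PySem.Set.ofList skip.toList).contains (Char.ofNat (p + 97).toNat)))
      = (pvPos skip).map (fun q : Nat => (q : Int)) := by
    rw [show (26 : Int) = ((26 : Nat) : Int) by norm_num, PySem.List.pyRange_zero_natCast,
      List.filter_map]
    unfold pvPos
    congr 1
  have hcount : ((pvPos skip).map (fun q : Nat => (q : Int))).countP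
      (fun p => decide (p ≤ (bn : Int))) = pvCnt skip bn := by
    rw [List.countP_map]
    unfold pvPos
    rw [List.countP_filter]
    have hsplit : (List.range 26) = List.range (bn + 1) ++ List.map (fun x => (bn + 1) + x) (List.range (25 - bn)) := by
      rw [← List.range_add]; congr 1; omega
    rw [hsplit, List.countP_append]
    have hB : List.countP (fun a : Nat => ((fun p : Int => decide (p ≤ (bn : Int))) ∘ fun q : Nat => (q : Int)) a && pvP skip a)
        (List.map (fun x => (bn + 1) + x) (List.range (25 - bn))) = 0 := by
      rw [List.countP_eq_zero]
      intro a ha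
      simp only [List.mem_map, List.mem_range] at ha
      obtain ⟨x, hx, rfl⟩ := ha
      have hgt : ¬ (((bn + 1 + x : Nat) : Int) ≤ (bn : Int)) := by push_cast; omega
      simp only [Function.comp_apply, decide_eq_false hgt, Bool.false_and]
      exact Bool.false_ne_true
    have hA : List.countP (fun a : Nat => ((fun p : Int => decide (p ≤ (bn : Int))) ∘ fun q : Nat => (q : Int)) a && pvP skip a)
        (List.range (bn + 1)) = pvCnt skip bn := by
      have hpt : ∀ x ∈ List.range (bn + 1),
          ((fun a : Nat => ((fun p : Int => decide (p ≤ (bn : Int))) ∘ fun q : Nat => (q : Int)) a && pvP skip a) x = true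
            ↔ pvP skip x = true) := by
        intro x hx
        simp only [List.mem_range] at hx
        have hle : ((x : Nat) : Int) ≤ (bn : Int) := by omega
        simp [hle]
      rw [List.countP_congr hpt]
      unfold pvCnt
      rw [List.countP_eq_length_filter]
    rw [hA, hB]
    omega
  -- the index into the allowed list, as a natural number
  have hm : PySem.Int.mod (((pvCnt skip bn : Nat) : Int) + index - 1) (((pvPos skip).map (fun q : Nat => (q : Int))).length : Int)
      = (((pvCnt skip bn + index.toNat - 1) % (pvPos skip).length : Nat) : Int) := by
    rw [List.length_map, PySem.Int.mod_eq_emod_of_pos (by exact_mod_cast hLpos)]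
    rw [show ((pvCnt skip bn : Nat) : Int) + index - 1
        = (((pvCnt skip bn + index.toNat - 1 : Nat)) : Int) by omega]
    rw [← Int.natCast_mod]
  have hmlt : (pvCnt skip bn + index.toNat - 1) % (pvPos skip).length < (pvPos skip).length :=
    Nat.mod_lt _ hLpos
  simp only [hbase, hallowed, hcount, hm]
  rw [PySem.List.pyGet?_natCast, List.getElem?_map,
    List.getElem?_eq_getElem hmlt]
  simp only [Option.map_some, Option.getD_some]
  rw [List.getD_eq_getElem (pvPos skip) 0 hmlt]
  exact congrArg Char.ofNat (by omega)

theorem pvFoldl_nil {α : Type} (g : Char → List α) (l : List Char) (acc : List α)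
    (h : ∀ ch ∈ l, g ch = []) : l.foldl (fun a ch => a ++ g ch) acc = acc := by
  induction l generalizing acc with
  | nil => rfl
  | cons x l ih =>
    simp only [List.foldl_cons]
    rw [h x (by simp), List.append_nil]
    exact ih acc (fun ch hch => h ch (by simp [hch]))

-- ===== VERDICT (by name: the statement is the Claim_ definition above) =====
theorem solution_spec : Claim_equal_solution := by
  unfold Claim_equal_solution
  intro s skip index hdom hpre
  unfold Spec_solution solution solution_alt
  dsimp only
  by_cases hidx : index < 1
  · rw [if_pos hidx]
    rw [pvFoldl_nil _ s.toList [] (fun ch _ => pvLoopA_done _ _ _ _ _ _ (by omega))]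
  · rw [if_neg hidx]
    have h1 : 1 ≤ index := by omega
    rcases hpre with h | h | h
    · omega
    · subst h
      simp
    · have hex : ∃ a, a < 26 ∧ pvP skip a = true := by
        rw [List.any_eq_true] at h
        obtain ⟨q, hqmem, hb⟩ := h
        refine ⟨q, List.mem_range.mp hqmem, ?_⟩
        simp only [pvP]
        simp [PySem.Set.mem_ofList] at hb ⊢
        exact hb
      have han : ∀ ch : Char,
          pvLoopA (PySem.Set.ofList skip.toList) ((ch.toNat : Int) - 97) (26 * (index + 2)).toNat 1 index []
            = [Char.ofNat ((pvPos skip).getD ((pvCnt skip (((ch.toNat : Int) - 97) % 26).toNat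
                + index.toNat - 1) % (pvPos skip).length) 0 + 97)] := by
        intro ch
        have hd : pvDist skip (((ch.toNat : Int) - 97) % 26).toNat ≤ 26 :=
          pvDistAux_le skip 26 _
        exact pvLoopA_eq skip hex ((ch.toNat : Int) - 97) (26 * (index + 2)).toNat 1 index []
          (((ch.toNat : Int) - 97) % 26).toNat index.toNat (by omega) (by omega) (by omega)
          (by omega) (by omega)
      simp only [han]
      rw [PySem.List.foldl_append_singleton_eq_map]
      simp only [List.nil_append]
      have hB := fun ch : Char => pvAlt_char_eq skip hex index h1 ch
      dsimp only at hB
      simp only [hB]
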